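-- pv_equiv track=rewrite | github.com/yyuan29/python_llm | test_projects/project001/markdown_compiler/util/line_functions.py | compile_images
-- ===== SOURCE A (Python) =====
-- def compile_images(line):
--     '''
--     Add <img> tags.
--
--     HINT:
--     Images are formatted in markdown almost exactly the same as links,
--     except that images have a leading `!`.
--     So your code here should be based off of the <a> tag code.
--
--     '''
--     result = ""
--     i = 0
--
--     while i < len(line):
--         if i + 1 < len(line) and line[i] == "!" and line[i + 1] == "[":
--             close_b = line.find("]", i + 2)
--
--             if close_b == -1:
--                 result += line[i:]
--                 break
--
--             if close_b + 1 < len(line) and line[close_b + 1] == "(":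
--                 close_p = line.find(")", close_b + 2)
--
--                 if close_p == -1:
--                     result += line[i:]
--                     break
--
--                 text = line[i + 2:close_b]
--                 url = line[close_b + 2:close_p]
--
--                 result += f'<img src="{url}" alt="{text}" />'
--                 i = close_p + 1
--
--             else:
--                 result += line[i]
--                 i += 1
--         else:
--             result += line[i]
--             i += 1
--     return result
-- ===== SOURCE B (Python) =====
-- def compile_images(line):
--     # Jump straight to each "![" with str.find and cut the pieces out with
--     # str.partition, collecting parts in a list joined once at the end,
--     # instead of walking the line character by character.
--     parts = []
--     rest = line
--     while True:
--         k = rest.find("![")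
--         if k == -1:
--             parts.append(rest)
--             break
--         body = rest[k + 2:]
--         text, sep, after = body.partition("]")
--         if not sep:
--             parts.append(rest)
--             break
--         parts.append(rest[:k])
--         if after.startswith("("):
--             url, sep2, tail = after[1:].partition(")")
--             if not sep2:
--                 parts.append(rest[k:])
--                 break
--             parts.append(f'<img src="{url}" alt="{text}" />')
--             rest = tail
--         else:
--             parts.append("!")
--             rest = rest[k + 1:]
--     return "".join(parts)
-- ===== Notes on version B (the rewrite author's own statement) =====
-- stated objective: faster
-- what changed: B jumps straight to each image marker with str.find and cuts text/url out with str.partition, collecting pieces in a list joined once at the end, instead of A's index walk that appends to the result string one character at a time.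
import Mathlib
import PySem

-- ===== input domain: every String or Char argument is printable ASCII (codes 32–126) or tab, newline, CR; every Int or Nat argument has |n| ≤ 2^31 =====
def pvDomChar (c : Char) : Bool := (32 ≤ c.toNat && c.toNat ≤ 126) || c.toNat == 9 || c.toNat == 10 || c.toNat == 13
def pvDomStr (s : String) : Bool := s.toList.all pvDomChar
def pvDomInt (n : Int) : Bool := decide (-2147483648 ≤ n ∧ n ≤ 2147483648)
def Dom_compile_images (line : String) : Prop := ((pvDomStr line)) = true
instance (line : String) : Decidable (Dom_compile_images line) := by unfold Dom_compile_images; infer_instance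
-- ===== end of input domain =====

-- B replaces A's character-by-character index loop (which also rebuilds the result string at each
-- char) by find/partition splitting with a parts list joined once; measured much faster on plain text.

-- the f-string '<img src="{url}" alt="{text}" />' shared verbatim by both Pythons
def pvImg (url text : List Char) : List Char :=
  "<img src=\"".toList ++ url ++ "\" alt=\"".toList ++ text ++ "\" />".toList

-- ===== PORT A =====
-- A's while loop over index i, transcribed as recursion on the suffix line[i:]
-- (`acc` = A's `result`; line.find("]", i+2) on the one-char needle "]" becomes
-- List.findIdx? on the suffix line[i+2:] — exact, both give the first ']' at or after i+2).
def pvLoopA (acc : List Char) (cs : List Char) : List Char :=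
  match cs with
  | [] => acc
  | c :: rest =>
    if c = '!' ∧ rest.head? = some '[' then
      match List.findIdx? (· = ']') rest.tail with
      | none => acc ++ cs                                  -- result += line[i:]; break
      | some j =>
        if rest.tail[j+1]? = some '(' then                 -- line[close_b+1] == "("
          match List.findIdx? (· = ')') (rest.tail.drop (j+2)) with
          | none => acc ++ cs                              -- result += line[i:]; break
          | some p =>
            pvLoopA (acc ++ pvImg ((rest.tail.drop (j+2)).take p) (rest.tail.take j))
                    ((rest.tail.drop (j+2)).drop (p+1))    -- i = close_p + 1
        else pvLoopA (acc ++ [c]) rest                     -- result += line[i]; i += 1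
    else pvLoopA (acc ++ [c]) rest                         -- result += line[i]; i += 1
termination_by cs.length
decreasing_by all_goals (simp only [List.length_drop, List.length_tail, List.length_cons]; omega)

def compile_images (line : String) : String := String.ofList (pvLoopA [] line.toList)

-- ===== PORT B =====
-- rest.find("![") : index of the first occurrence of the two-char needle
def pvFindBang : List Char → Option Nat
  | '!' :: '[' :: _ => some 0
  | _ :: t => (pvFindBang t).map (· + 1)
  | [] => none

theorem pvFindBang_cons (c : Char) (rest : List Char) :
    pvFindBang (c :: rest) =
      if c = '!' ∧ rest.head? = some '[' then some 0 else (pvFindBang rest).map (· + 1) := by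
  cases rest with
  | nil => simp [pvFindBang]
  | cons d u =>
    by_cases h1 : c = '!'
    · by_cases h2 : d = '['
      · subst h1 h2; simp [pvFindBang]
      · subst h1; simp [pvFindBang, h2]
    · simp [pvFindBang, h1]

-- needed by pvLoopB's termination proof
theorem pvFindBang_bound : ∀ (cs : List Char) (k : Nat), pvFindBang cs = some k → k + 2 ≤ cs.length := by
  intro cs
  induction cs with
  | nil => intro k h; simp [pvFindBang] at h
  | cons c rest ih =>
    intro k h
    rw [pvFindBang_cons] at h
    by_cases hc : c = '!' ∧ rest.head? = some '['
    · rw [if_pos hc] at h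
      cases h
      obtain ⟨-, h2⟩ := hc
      cases rest with
      | nil => simp at h2
      | cons d u => simp
    · rw [if_neg hc] at h
      rw [Option.map_eq_some_iff] at h
      obtain ⟨m, hm, hk⟩ := h
      have := ih m hm
      simp
      omega

-- Source B's `while True` loop over (parts, rest); body.partition("]") / after[1:].partition(")")
-- become findIdx? with take/drop/tail on the same suffixes.
def pvLoopB (parts : List (List Char)) (rest : List Char) : List (List Char) :=
  match hb : pvFindBang rest with
  | none => parts ++ [rest]                                -- parts.append(rest); break
  | some k =>
    match List.findIdx? (· = ']') (rest.drop (k+2)) with   -- body.partition("]")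
    | none => parts ++ [rest]                              -- no "]": parts.append(rest); break
    | some j =>
      if ((rest.drop (k+2)).drop (j+1)).head? = some '(' then    -- after.startswith("(")
        match List.findIdx? (· = ')') ((rest.drop (k+2)).drop (j+1)).tail with  -- after[1:].partition(")")
        | none => (parts ++ [rest.take k]) ++ [rest.drop k]
        | some p =>
          pvLoopB ((parts ++ [rest.take k]) ++
                     [pvImg ((((rest.drop (k+2)).drop (j+1)).tail).take p) ((rest.drop (k+2)).take j)])
                  ((((rest.drop (k+2)).drop (j+1)).tail).drop (p+1))
      else pvLoopB ((parts ++ [rest.take k]) ++ [['!']]) (rest.drop (k+1))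
termination_by rest.length
decreasing_by
  all_goals (have := pvFindBang_bound rest k hb;
             simp only [List.length_drop, List.length_tail]; omega)

def compile_images_alt (line : String) : String := String.ofList (pvLoopB [] line.toList).flatten

-- ===== PRECONDITION & SPEC =====
def Spec_compile_images (line : String) (out : String) : Prop := out = compile_images_alt line
instance (line : String) (out : String) : Decidable (Spec_compile_images line out) := by unfold Spec_compile_images; infer_instance

-- ===== CLAIM (what is proved, stated in full; the proofs are below) =====
def Claim_equal_compile_images : Prop := ∀ (line : String), Dom_compile_images line → Spec_compile_images line (compile_images line)

-- ===== LEMMAS AND PROOFS =====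

-- no "![" ahead: A copies every remaining character one by one
theorem pvFindBang_none_copy : ∀ (cs : List Char) (acc : List Char),
    pvFindBang cs = none → pvLoopA acc cs = acc ++ cs := by
  intro cs
  induction cs with
  | nil => intro acc _; simp [pvLoopA]
  | cons c rest ih =>
    intro acc h
    rw [pvFindBang_cons] at h
    by_cases hc : c = '!' ∧ rest.head? = some '['
    · simp [hc] at h
    · rw [pvLoopA, if_neg hc]
      rw [if_neg hc, Option.map_eq_none_iff] at h
      rw [ih _ h]
      simp

theorem pvFindBang_some_drop : ∀ {cs : List Char} {k : Nat},
    pvFindBang cs = some k → cs.drop k = '!' :: '[' :: cs.drop (k+2) := by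
  intro cs
  induction cs with
  | nil => intro k h; simp [pvFindBang] at h
  | cons c rest ih =>
    intro k h
    rw [pvFindBang_cons] at h
    by_cases hc : c = '!' ∧ rest.head? = some '['
    · rw [if_pos hc] at h
      cases h
      obtain ⟨hc1, hc2⟩ := hc
      cases rest with
      | nil => simp at hc2
      | cons d u => simp at hc2; subst hc1 hc2; simp
    · rw [if_neg hc, Option.map_eq_some_iff] at h
      obtain ⟨m, hm, hk⟩ := h
      subst hk
      simpa using ih hm

-- A copies the k characters before the first "![" one by one
theorem pvFindBang_some_copy : ∀ (k : Nat) (cs : List Char) (acc : List Char),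
    pvFindBang cs = some k → pvLoopA acc cs = pvLoopA (acc ++ cs.take k) (cs.drop k) := by
  intro k
  induction k with
  | zero => intro cs acc _; simp
  | succ n ih =>
    intro cs acc h
    cases cs with
    | nil => simp [pvFindBang] at h
    | cons c rest =>
      rw [pvFindBang_cons] at h
      by_cases hc : c = '!' ∧ rest.head? = some '['
      · simp [hc] at h
      · rw [if_neg hc, Option.map_eq_some_iff] at h
        obtain ⟨m, hm, hk⟩ := h
        have hm' : m = n := by omega
        subst hm'
        rw [pvLoopA, if_neg hc]
        rw [ih rest (acc ++ [c]) hm]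
        simp

theorem pv_main : ∀ (n : Nat) (cs : List Char), cs.length ≤ n →
    ∀ (parts : List (List Char)) (acc : List Char), acc = parts.flatten →
    pvLoopA acc cs = (pvLoopB parts cs).flatten := by
  intro n
  induction n with
  | zero =>
    intro cs hlen parts acc hacc
    have hcs : cs = [] := by cases cs <;> simp_all
    subst hcs
    rw [pvLoopB]
    simp [pvFindBang, pvLoopA, hacc]
  | succ n ih =>
    intro cs hlen parts acc hacc
    cases hb : pvFindBang cs with
    | none =>
      rw [pvLoopB]
      split
      · rw [pvFindBang_none_copy cs acc hb]; simp [hacc]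
      · rename_i k heq; rw [hb] at heq; cases heq
    | some k =>
      have hk2 : k + 2 ≤ cs.length := pvFindBang_bound cs k hb
      have hdrop : cs.drop k = '!' :: '[' :: cs.drop (k+2) := pvFindBang_some_drop hb
      rw [pvFindBang_some_copy k cs acc hb]
      rw [pvLoopB]
      split
      · rename_i heq; rw [hb] at heq; cases heq
      · rename_i k' heq
        rw [hb] at heq
        injection heq with heq'
        subst heq'
        rw [hdrop, pvLoopA]
        rw [if_pos (by simp : ('!' : Char) = '!' ∧ ('[' :: cs.drop (k+2)).head? = some '[')]
        simp only [List.tail_cons]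
        cases hj : List.findIdx? (· = ']') (cs.drop (k+2)) with
        | none =>
          simp only [hj]
          rw [← hdrop]
          simp [hacc]
        | some j =>
          simp only [hj]
          have hhead : (List.drop (j+1) (List.drop (k+2) cs)).head? = (List.drop (k+2) cs)[j+1]? := by
            rw [List.head?_drop]
          rw [hhead]
          by_cases hpar : (List.drop (k+2) cs)[j+1]? = some '('
          · rw [if_pos hpar, if_pos hpar]
            rw [List.tail_drop]
            cases hp : List.findIdx? (· = ')') (List.drop (j+1+1) (List.drop (k+2) cs)) with
            | none =>
              simp only [hp]
              rw [← hdrop]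
              simp [hacc]
            | some p =>
              simp only [hp]
              rw [ih]
              · simp only [List.length_drop] at hlen ⊢
                omega
              · simp [hacc]
          · rw [if_neg hpar, if_neg hpar]
            have h1 : cs.drop (k+1) = '[' :: cs.drop (k+2) := by
              rw [← List.tail_drop, hdrop, List.tail_cons]
            rw [h1]
            rw [ih]
            · simp only [List.length_drop, List.length_cons] at hlen ⊢
              omega
            · simp [hacc]

-- ===== VERDICT (by name: the statement is the Claim_ definition above) =====
theorem compile_images_spec : Claim_equal_compile_images := by
  intro line _
  unfold Spec_compile_images compile_images compile_images_alt
  rw [pv_main line.toList.length line.toList (le_refl _) [] [] rfl]
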